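-- pv_equiv track=rewrite | github.com/aLexzzz430/Cognitive-OS | core/orchestration/structured_answer.py | _normalize_patch_signature
-- ===== SOURCE A (Python) =====
-- from typing import Any, Callable, Dict, List, Optional, Sequence, Set, Tuple
--
-- def _normalize_patch_signature(patch: Tuple[Tuple[int, ...], ...]) -> Tuple[Tuple[int, ...], ...]:
--     color_ids: Dict[int, int] = {}
--     next_color_id = 0
--     normalized: List[Tuple[int, ...]] = []
--     for row in patch:
--         normalized_row: List[int] = []
--         for cell in row:
--             if cell == -1:
--                 normalized_row.append(-1)
--                 continue
--             if cell not in color_ids: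
--                 color_ids[cell] = next_color_id
--                 next_color_id += 1
--             normalized_row.append(color_ids[cell])
--         normalized.append(tuple(normalized_row))
--     return tuple(normalized)
-- ===== SOURCE B (Python) =====
-- def _normalize_patch_signature(patch):
--     # Table-free: a color's canonical id is the number of distinct non-(-1)
--     # colors appearing strictly before its first row-major occurrence; each
--     # cell is resolved independently by this count, no id map is maintained.
--     flat = [c for row in patch for c in row]
--     def rank(c):
--         i = flat.index(c)
--         return len({x for x in flat[:i] if x != -1})
--     return tuple(tuple(-1 if c == -1 else rank(c) for c in row) for row in patch)
-- ===== Notes on version B (the rewrite author's own statement) =====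
-- stated objective: alternative
-- what changed: Replaces A's stateful single pass that assigns ids by mutating a first-seen dict and counter with a table-free closed form: every cell's id is computed independently as the count of distinct non-(-1) colors strictly before that color's first row-major occurrence (flat.index + a set over the prefix), trading speed for statelessness.
import Mathlib
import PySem

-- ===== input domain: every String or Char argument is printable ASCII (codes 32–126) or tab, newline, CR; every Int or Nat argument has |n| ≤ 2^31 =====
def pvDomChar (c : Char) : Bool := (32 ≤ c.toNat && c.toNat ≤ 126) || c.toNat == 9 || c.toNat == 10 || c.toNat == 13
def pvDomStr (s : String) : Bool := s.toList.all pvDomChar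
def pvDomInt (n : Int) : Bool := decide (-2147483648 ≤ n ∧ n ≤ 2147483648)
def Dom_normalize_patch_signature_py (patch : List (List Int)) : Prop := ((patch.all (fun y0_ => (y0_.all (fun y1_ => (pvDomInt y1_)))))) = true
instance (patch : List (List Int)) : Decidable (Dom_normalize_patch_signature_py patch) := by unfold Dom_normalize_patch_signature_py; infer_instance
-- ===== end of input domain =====

-- B replaces A's stateful dict/counter relabeling pass by a table-free per-cell closed form
-- (count of distinct earlier non-(-1) colors before the color's first occurrence); alternative decomposition, same results.


-- ===== PORT A =====
-- inner loop body: state = (color_ids, next_color_id, normalized_row)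
def aStep (s : PySem.Dict Int Int × Int × List Int) (cell : Int) : PySem.Dict Int Int × Int × List Int :=
  if cell = -1 then (s.1, s.2.1, s.2.2 ++ [(-1 : Int)])
  else if s.1.contains cell then (s.1, s.2.1, s.2.2 ++ [s.1.getD cell 0])
  else ((s.1.insert cell s.2.1), s.2.1 + 1,
        s.2.2 ++ [(s.1.insert cell s.2.1).getD cell 0])  -- color_ids[cell]: key just inserted, default never used

-- outer loop body: state = (color_ids, next_color_id, normalized)
def aRow (st : PySem.Dict Int Int × Int × List (List Int)) (row : List Int) :
    PySem.Dict Int Int × Int × List (List Int) :=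
  let inner := row.foldl aStep (st.1, st.2.1, ([] : List Int))
  (inner.1, inner.2.1, st.2.2 ++ [inner.2.2])

def normalize_patch_signature_py (patch : List (List Int)) : List (List Int) :=
  (patch.foldl aRow (PySem.Dict.empty, (0 : Int), ([] : List (List Int)))).2.2

-- ===== PORT B =====
-- rank(c): i = flat.index(c); len({x for x in flat[:i] if x != -1})
-- flat[:i] with nonnegative i is List.take i (exact); the set comprehension is PySem.Set.ofList of the filtered prefix
def bRank (flat : List Int) (c : Int) : Int :=
  let i := (PySem.List.index? flat c).getD 0   -- flat.index(c): every cell occurs in flat, ValueError never occurs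
  ((PySem.Set.ofList ((flat.take i).filter (fun x => x ≠ -1))).length : Int)

def normalize_patch_signature_py_alt (patch : List (List Int)) : List (List Int) :=
  let flat := patch.flatMap (fun r => r)
  patch.map (fun row => row.map (fun c => if c = -1 then -1 else bRank flat c))

-- ===== PRECONDITION & SPEC =====
def Spec_normalize_patch_signature_py (patch : List (List Int)) (out : List (List Int)) : Prop := out = normalize_patch_signature_py_alt patch
instance (patch : List (List Int)) (out : List (List Int)) : Decidable (Spec_normalize_patch_signature_py patch out) := by unfold Spec_normalize_patch_signature_py; infer_instance

-- ===== CLAIM (what is proved, stated in full; the proofs are below) =====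
def Claim_equal_normalize_patch_signature_py : Prop := ∀ (patch : List (List Int)), Dom_normalize_patch_signature_py patch → Spec_normalize_patch_signature_py patch (normalize_patch_signature_py patch)

-- ===== LEMMAS AND PROOFS =====

-- the value A assigns to a cell, phrased via positional lookup in the first-occurrence order (proof-side abbreviation)
def bVal (order : List Int) (c : Int) : Int :=
  if c = -1 then -1 else (((PySem.List.index? order c).getD 0 : Nat) : Int)

-- the "distinct colors seen so far" abstraction of A's dict
def sStep (s : List Int) (c : Int) : List Int :=
  if c = -1 then s else if c ∈ s then s else s ++ [c]

def seenRows (seen : List Int) (rows : List (List Int)) : List Int :=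
  rows.foldl (fun s row => row.foldl sStep s) seen

-- invariant linking A's dict state to the seen list
def DictInv (seen : List Int) (d : PySem.Dict Int Int) (n : Int) : Prop :=
  n = (seen.length : Int) ∧ (∀ c : Int, d.contains c = decide (c ∈ seen)) ∧
  ∀ c ∈ seen, d.getD c 0 = (((PySem.List.index? seen c).getD 0 : Nat) : Int)

lemma prefix_sStep (seen : List Int) (c : Int) : seen <+: sStep seen c := by
  unfold sStep; split_ifs <;> simp

lemma prefix_seenFold (cells : List Int) : ∀ seen, seen <+: cells.foldl sStep seen := by
  induction cells with
  | nil => simp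
  | cons c cs ih =>
    intro seen
    exact (prefix_sStep seen c).trans (ih (sStep seen c))

lemma prefix_seenRows (rows : List (List Int)) : ∀ seen, seen <+: seenRows seen rows := by
  induction rows with
  | nil => simp [seenRows]
  | cons r rs ih =>
    intro seen
    exact (prefix_seenFold r seen).trans (ih (r.foldl sStep seen))

lemma bVal_of_mem_prefix {seen order : List Int} (h : seen <+: order) {c : Int} (hc : c ∈ seen)
    (hm1 : (-1 : Int) ∉ seen) :
    bVal order c = (((PySem.List.index? seen c).getD 0 : Nat) : Int) := by
  have hne : c ≠ -1 := fun hh => hm1 (hh ▸ hc)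
  obtain ⟨t, rfl⟩ := h
  unfold bVal
  rw [if_neg hne, PySem.List.index?_append_of_mem t hc]

lemma inner_fold (order : List Int) (cells : List Int) :
    ∀ (seen : List Int) (d : PySem.Dict Int Int) (n : Int) (out : List Int),
    DictInv seen d n → (cells.foldl sStep seen) <+: order → (-1 : Int) ∉ seen →
    DictInv (cells.foldl sStep seen) (cells.foldl aStep (d, n, out)).1 (cells.foldl aStep (d, n, out)).2.1 ∧
      (cells.foldl aStep (d, n, out)).2.2 = out ++ cells.map (bVal order) ∧
      (-1 : Int) ∉ cells.foldl sStep seen := by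
  induction cells with
  | nil => intro seen d n out hI hp hm; exact ⟨hI, by simp, hm⟩
  | cons c cs ih =>
    intro seen d n out hI hp hm
    obtain ⟨hn, hcont, hget⟩ := hI
    rw [List.foldl_cons, List.foldl_cons] at *
    by_cases hc1 : c = -1
    · subst hc1
      have hstep : sStep seen (-1) = seen := by simp [sStep]
      have haste : aStep (d, n, out) (-1) = (d, n, out ++ [(-1 : Int)]) := by simp [aStep]
      rw [hstep] at hp ⊢
      rw [haste]
      obtain ⟨h1, h2, h3⟩ := ih seen d n (out ++ [(-1 : Int)]) ⟨hn, hcont, hget⟩ hp hm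
      exact ⟨h1, by simp [h2, bVal], h3⟩
    · by_cases hcm : c ∈ seen
      · have hstep : sStep seen c = seen := by simp [sStep, hc1, hcm]
        have haste : aStep (d, n, out) c = (d, n, out ++ [d.getD c 0]) := by
          simp [aStep, hc1, hcont, hcm]
        rw [hstep] at hp ⊢
        have hpre : seen <+: order := (prefix_seenFold cs seen).trans hp
        have hv : d.getD c 0 = bVal order c := by
          rw [bVal_of_mem_prefix hpre hcm hm]; exact hget c hcm
        rw [haste]
        obtain ⟨h1, h2, h3⟩ := ih seen d n (out ++ [d.getD c 0]) ⟨hn, hcont, hget⟩ hp hm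
        exact ⟨h1, by rw [h2, hv]; simp, h3⟩
      · -- fresh color
        have hstep : sStep seen c = seen ++ [c] := by simp [sStep, hc1, hcm]
        have hcontc : d.contains c = false := by rw [hcont c]; simp [hcm]
        have haste : aStep (d, n, out) c
            = (d.insert c n, n + 1, out ++ [(d.insert c n).getD c 0]) := by
          simp [aStep, hc1, hcontc]
        have hgd : (d.insert c n).getD c 0 = n := PySem.Dict.getD_insert_self d c n 0
        have hidx : PySem.List.index? (seen ++ [c]) c = some seen.length :=
          PySem.List.index?_append_singleton_self seen c hcm
        have hm' : (-1 : Int) ∉ seen ++ [c] := by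
          simp [hm]; exact fun hh => hc1 hh.symm
        have hInv' : DictInv (seen ++ [c]) (d.insert c n) (n + 1) := by
          refine ⟨by simp [hn], ?_, ?_⟩
          · intro c'
            rw [PySem.Dict.contains_insert, hcont c']
            by_cases h : c' = c <;> simp [h]
          · intro c' hc'
            rcases List.mem_append.1 hc' with h | h
            · have hne : c' ≠ c := fun hh => hcm (hh ▸ h)
              rw [PySem.Dict.getD_insert_of_ne d n 0 hne,
                PySem.List.index?_append_of_mem [c] h]
              exact hget c' h
            · have : c' = c := by simpa using h
              subst this
              rw [PySem.Dict.getD_insert_self, hidx, hn]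
              simp
        rw [hstep] at hp ⊢
        have hpre' : seen ++ [c] <+: order := (prefix_seenFold cs _).trans hp
        have hv : (d.insert c n).getD c 0 = bVal order c := by
          rw [bVal_of_mem_prefix hpre' (by simp) hm', hidx, hgd, hn]; simp
        rw [haste]
        obtain ⟨h1, h2, h3⟩ := ih (seen ++ [c]) (d.insert c n) (n + 1)
          (out ++ [(d.insert c n).getD c 0]) hInv' hp hm'
        exact ⟨h1, by rw [h2, hv]; simp, h3⟩

lemma outer_fold (order : List Int) (rows : List (List Int)) :
    ∀ (seen : List Int) (d : PySem.Dict Int Int) (n : Int) (acc : List (List Int)),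
    DictInv seen d n → seenRows seen rows <+: order → (-1 : Int) ∉ seen →
    (rows.foldl aRow (d, n, acc)).2.2 = acc ++ rows.map (fun row => row.map (bVal order)) := by
  induction rows with
  | nil => intro seen d n acc _ _ _; simp
  | cons r rs ih =>
    intro seen d n acc hI hp hm
    rw [List.foldl_cons]
    have hp' : seenRows (r.foldl sStep seen) rs <+: order := by
      simpa [seenRows, List.foldl_cons] using hp
    have hpr : r.foldl sStep seen <+: order :=
      (prefix_seenRows rs (r.foldl sStep seen)).trans hp'
    obtain ⟨h1, h2, h3⟩ := inner_fold order r seen d n [] hI hpr hm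
    have harow : aRow (d, n, acc) r
        = ((r.foldl aStep (d, n, ([] : List Int))).1,
           (r.foldl aStep (d, n, ([] : List Int))).2.1,
           acc ++ [(r.foldl aStep (d, n, ([] : List Int))).2.2]) := rfl
    rw [harow]
    rw [ih (r.foldl sStep seen) _ _ _ h1 hp' h3]
    simp [h2]

lemma filt_fold (l : List Int) : ∀ s : List Int,
    (l.filter (fun c => c ≠ -1)).foldl PySem.Set.add s = l.foldl sStep s := by
  induction l with
  | nil => intro s; rfl
  | cons a l ih =>
    intro s
    by_cases ha : a = -1
    · rw [List.filter_cons_of_neg (by simp [ha]), List.foldl_cons,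
        show sStep s a = s from by simp [sStep, ha]]
      exact ih s
    · rw [List.filter_cons_of_pos (by simp [ha]), List.foldl_cons, List.foldl_cons, ih,
        PySem.Set.add_eq_ite]
      simp [sStep, ha]

-- folding sStep over the row-major flattening is the nested row-by-row fold
lemma flat_sfold (patch : List (List Int)) : ∀ s : List Int,
    (patch.flatMap (fun r => r)).foldl sStep s = seenRows s patch := by
  induction patch with
  | nil => intro s; rfl
  | cons r rs ih =>
    intro s
    rw [List.flatMap_cons, List.foldl_append, ih]
    rfl

-- elements produced by the sStep fold come from the start state or the list
lemma mem_sfold (l : List Int) : ∀ (s : List Int) (x : Int),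
    x ∈ l.foldl sStep s → x ∈ s ∨ x ∈ l := by
  induction l with
  | nil => intro s x h; exact Or.inl h
  | cons a l ih =>
    intro s x h
    rcases ih (sStep s a) x h with h' | h'
    · unfold sStep at h'
      split_ifs at h' with h1 h2
      · exact Or.inl h'
      · exact Or.inl h'
      · rcases List.mem_append.1 h' with h'' | h''
        · exact Or.inl h''
        · exact Or.inr (by simp at h''; simp [h''])
    · exact Or.inr (List.mem_cons_of_mem a h')

-- the key closed form: B's rank of a cell is its index in the first-occurrence order
lemma rank_eq (patch : List (List Int)) {c : Int} (hc1 : c ≠ -1)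
    (hmem : c ∈ patch.flatMap (fun r => r)) :
    bRank (patch.flatMap (fun r => r)) c = bVal (seenRows [] patch) c := by
  set flat := patch.flatMap (fun r => r) with hflat
  obtain ⟨k, hk⟩ := Option.isSome_iff_exists.1 ((PySem.List.index?_isSome_iff flat c).2 hmem)
  obtain ⟨hlt, hget, hfirst⟩ := PySem.List.getElem_of_index?_eq_some hk
  have hnt : c ∉ flat.take k := by
    intro h
    obtain ⟨j, hj, hjv⟩ := List.mem_iff_getElem.1 h
    have hj2 : j < k ∧ j < flat.length := by simpa using hj
    exact hfirst j hj2.1 (by simpa using hjv)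
  set seenk := (flat.take k).foldl sStep [] with hseenk
  have hcns : c ∉ seenk := fun h => by
    rcases mem_sfold _ _ _ h with h' | h'
    · simp at h'
    · exact hnt h'
  -- seenk ++ [c] is a prefix of the full first-occurrence order
  have hsplit : flat = flat.take k ++ c :: flat.drop (k + 1) := by
    conv_lhs => rw [← List.take_append_drop k flat]
    rw [List.drop_eq_getElem_cons hlt, hget]
  have hord : seenRows [] patch = flat.foldl sStep [] := (flat_sfold patch []).symm
  have hstep : sStep seenk c = seenk ++ [c] := by simp [sStep, hc1, hcns]
  have hpre : seenk ++ [c] <+: seenRows [] patch := by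
    rw [hord, hsplit, List.foldl_append, List.foldl_cons, ← hseenk, hstep]
    exact prefix_seenFold _ _
  obtain ⟨t, ht⟩ := hpre
  have hidx : PySem.List.index? (seenRows [] patch) c = some seenk.length := by
    rw [← ht, PySem.List.index?_append_of_mem t (by simp),
      PySem.List.index?_append_singleton_self seenk c hcns]
  -- compute B's rank
  unfold bRank bVal
  rw [if_neg hc1, hk, hidx]
  show ((PySem.Set.ofList ((flat.take k).filter (fun x => x ≠ -1))).length : Int)
      = (((some seenk.length).getD 0 : Nat) : Int)
  rw [PySem.Set.ofList_eq_foldl, filt_fold, ← hseenk]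
  simp

-- ===== VERDICT (by name: the statement is the Claim_ definition above) =====
theorem normalize_patch_signature_py_spec : Claim_equal_normalize_patch_signature_py := by
  intro patch _
  unfold Spec_normalize_patch_signature_py normalize_patch_signature_py normalize_patch_signature_py_alt
  have hInv : DictInv [] PySem.Dict.empty 0 := by
    refine ⟨by simp, fun c => by simp, by simp⟩
  have hA := outer_fold (seenRows [] patch) patch [] PySem.Dict.empty 0 [] hInv
    (List.prefix_refl _) (by simp)
  rw [hA, List.nil_append]
  refine List.map_congr_left (fun row hrow => List.map_congr_left (fun c hcrow => ?_))
  by_cases hc1 : c = -1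
  · simp [bVal, hc1]
  · rw [← rank_eq patch hc1 (List.mem_flatMap.2 ⟨row, hrow, hcrow⟩)]
    simp [hc1]
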